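-- pv_equiv track=rewrite | github.com/segatomo/ci | 2019/2019.py | clustnum
-- ===== SOURCE A (Python) =====
-- def calc_distance(x, y):
--     return sum([abs(a-b) for a,b in zip(x,y)])
--
-- def clustnum(rep, pixel):
--     """
--     rep: 代表画素
--     pixelがどのクラスタに分類されるか計算する
--     """
--     res = 0   # クラスタ番号
--     tmp = calc_distance(rep[0], pixel)   # 最小距離
--     for i in range(1,len(rep)):
--         if tmp >= calc_distance(rep[i], pixel):   # 最大のインデックスを選ぶ
--             tmp = calc_distance(rep[i], pixel)
--             res = i
--     return res
-- ===== SOURCE B (Python) =====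
-- def clustnum(rep, pixel):
--     dists = [sum(abs(a - b) for a, b in zip(r, pixel)) for r in rep]
--     return len(dists) - 1 - dists[::-1].index(min(dists))
-- ===== Notes on version B (the rewrite author's own statement) =====
-- stated objective: simpler
-- what changed: A's running-minimum index loop with repeated calc_distance calls (up to three per element) is replaced by one pass building the distance table and a separate selection 'last index of the minimum' via min() and a reverse index lookup.
import Mathlib
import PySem

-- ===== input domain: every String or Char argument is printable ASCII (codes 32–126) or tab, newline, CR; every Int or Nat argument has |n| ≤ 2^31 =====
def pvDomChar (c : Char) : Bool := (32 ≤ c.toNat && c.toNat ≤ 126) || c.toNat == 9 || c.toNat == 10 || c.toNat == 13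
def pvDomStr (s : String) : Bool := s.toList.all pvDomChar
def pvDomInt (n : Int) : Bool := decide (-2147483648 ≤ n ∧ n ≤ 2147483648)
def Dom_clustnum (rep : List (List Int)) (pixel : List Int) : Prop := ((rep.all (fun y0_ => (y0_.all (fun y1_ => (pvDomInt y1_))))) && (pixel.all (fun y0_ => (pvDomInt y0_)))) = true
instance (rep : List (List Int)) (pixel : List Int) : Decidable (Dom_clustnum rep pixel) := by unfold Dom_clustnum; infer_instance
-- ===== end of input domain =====

-- B replaces A's running-minimum loop (3 distance calls per element) by a distance
-- table plus a separate last-argmin selection via min() and a reverse index lookup (objective: simpler).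

-- ===== PORT A =====
def calcDistance (x : List Int) (y : List Int) : Int :=
  ((x.zip y).map (fun p => |p.1 - p.2|)).sum

def clustnum (rep : List (List Int)) (pixel : List Int) : Int :=
  let res : Int := 0
  let tmp : Int := calcDistance ((PySem.List.pyGet? rep 0).getD []) pixel
  let st :=
    (PySem.List.pyRange 1 (rep.length : Int) 1).foldl
      (fun (st : Int × Int) i =>
        if st.2 ≥ calcDistance ((PySem.List.pyGet? rep i).getD []) pixel then
          (i, calcDistance ((PySem.List.pyGet? rep i).getD []) pixel)
        else st)
      (res, tmp)
  st.1

-- ===== PORT B =====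
def clustnum_alt (rep : List (List Int)) (pixel : List Int) : Int :=
  let dists := rep.map (fun r => ((r.zip pixel).map (fun p => |p.1 - p.2|)).sum)
  let m := (PySem.List.min? dists (fun x => x)).getD 0
  (dists.length : Int) - 1 - ((PySem.List.index? dists.reverse m).getD 0 : Nat)

-- ===== PRECONDITION & SPEC =====
-- Pre_ excludes exactly rep = [], where Python A raises IndexError (rep[0]) and B raises ValueError (min of empty).
def Pre_clustnum (rep : List (List Int)) (pixel : List Int) : Prop := rep ≠ []
instance (rep : List (List Int)) (pixel : List Int) : Decidable (Pre_clustnum rep pixel) := by unfold Pre_clustnum; infer_instance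
def pvWitness_clustnum : List (List Int) × List Int := ([[1, 2], [0, 0]], [0, 1])

def Spec_clustnum (rep : List (List Int)) (pixel : List Int) (out : Int) : Prop := out = clustnum_alt rep pixel
instance (rep : List (List Int)) (pixel : List Int) (out : Int) : Decidable (Spec_clustnum rep pixel out) := by unfold Spec_clustnum; infer_instance

-- ===== CLAIM (what is proved, stated in full; the proofs are below) =====
def Claim_equal_clustnum : Prop := ∀ (rep : List (List Int)) (pixel : List Int), Dom_clustnum rep pixel → Pre_clustnum rep pixel → Spec_clustnum rep pixel (clustnum rep pixel)

-- ===== LEMMAS AND PROOFS =====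

-- structural form of A's index loop: state (res, tmp), counter k, remaining distance values
def loopA (r m k : Int) : List Int → Int × Int
  | [] => (r, m)
  | x :: t => if m ≥ x then loopA k x (k + 1) t else loopA r m (k + 1) t

theorem foldl_min_mem (t : List Int) : ∀ x : Int, t.foldl min x ∈ x :: t := by
  induction t with
  | nil => intro x; simp [List.foldl]
  | cons y t ih =>
    intro x
    have h := ih (min x y)
    show t.foldl min (min x y) ∈ x :: y :: t
    rcases List.mem_cons.mp h with h | h
    · rw [h]
      rcases le_total x y with hxy | hxy
      · rw [min_eq_left hxy]; exact List.mem_cons_self ..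
      · rw [min_eq_right hxy]; exact List.mem_cons_of_mem _ (List.mem_cons_self ..)
    · exact List.mem_cons_of_mem _ (List.mem_cons_of_mem _ h)

theorem foldl_min_le_init (t : List Int) : ∀ m : Int, t.foldl min m ≤ m := by
  induction t with
  | nil => intro m; simp
  | cons x t ih =>
    intro m
    exact le_trans (ih (min m x)) (min_le_left m x)

-- A's pyRange/pyGet? index loop is loopA on the distance table of the tail
theorem bridgeA (pixel : List Int) (xs : List (List Int)) :
    ∀ (pre : List (List Int)) (st : Int × Int),
      (PySem.List.pyRange (pre.length : Int) ((pre.length + xs.length : Nat) : Int) 1).foldl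
        (fun (st : Int × Int) i =>
          if st.2 ≥ calcDistance ((PySem.List.pyGet? (pre ++ xs) i).getD []) pixel then
            (i, calcDistance ((PySem.List.pyGet? (pre ++ xs) i).getD []) pixel)
          else st)
        st
      = loopA st.1 st.2 (pre.length : Int) (xs.map (fun r => calcDistance r pixel)) := by
  induction xs with
  | nil => intro pre st; simp [PySem.List.pyRange_one_eq_nil, loopA]
  | cons x t ih =>
    intro pre st
    have hlt : (pre.length : Int) < ((pre.length + (x :: t).length : Nat) : Int) := by
      exact_mod_cast Nat.lt_add_of_pos_right (by simp)
    rw [PySem.List.pyRange_one_cons hlt]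
    have hget : (PySem.List.pyGet? (pre ++ x :: t) (pre.length : Int)).getD [] = x := by
      have : PySem.List.pyGet? (pre ++ x :: t) (pre.length : Int) =
          (pre ++ x :: t)[pre.length]? := by
        simp [PySem.List.pyGet?, PySem.List.pyIdx?]
      rw [this, List.getElem?_append_right (Nat.le_refl _)]
      simp
    have ihspec := ih (pre ++ [x])
    simp only [List.length_append, List.length_singleton] at ihspec
    have h1 : pre.length + 1 + t.length = pre.length + (x :: t).length := by
      simp [List.length_cons]; omega
    rw [h1] at ihspec
    have h2 : ((pre.length + 1 : Nat) : Int) = (pre.length : Int) + 1 := by push_cast; ring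
    rw [h2] at ihspec
    have h3 : pre ++ [x] ++ t = pre ++ x :: t := by simp
    rw [h3] at ihspec
    simp only [List.foldl_cons, hget]
    by_cases hge : st.2 ≥ calcDistance x pixel
    · rw [if_pos hge, ihspec ((pre.length : Int), calcDistance x pixel)]
      simp [List.map, loopA, hge]
    · rw [if_neg hge, ihspec st]
      simp [List.map, loopA, hge]

-- the loop computes the last index of the minimum, phrased via a reverse index lookup
theorem loopA_spec (l : List Int) : ∀ (r m k : Int),
    loopA r m k l =
      ((if l.foldl min m ∈ l
        then k + ((l.length : Int) - 1) - ((PySem.List.index? l.reverse (l.foldl min m)).getD 0 : Nat)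
        else r), l.foldl min m) := by
  induction l with
  | nil => intro r m k; simp [loopA]
  | cons x t ih =>
    intro r m k
    by_cases hge : m ≥ x
    · have hM : (x :: t).foldl min m = t.foldl min x := by
        simp [List.foldl_cons, min_eq_right hge]
      have hmem : t.foldl min x ∈ x :: t := foldl_min_mem t x
      rw [show loopA r m k (x :: t) = loopA k x (k + 1) t from by simp [loopA, hge],
          hM, if_pos hmem, ih k x (k + 1)]
      by_cases hmt : t.foldl min x ∈ t
      · rw [if_pos hmt, List.reverse_cons,
            PySem.List.index?_append_of_mem [x] (by simpa using hmt)]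
        simp only [Prod.mk.injEq, List.length_cons]
        exact ⟨by push_cast; ring, trivial⟩
      · have hx : t.foldl min x = x := by
          rcases List.mem_cons.mp hmem with h | h
          · exact h
          · exact absurd h hmt
        have hxt : x ∉ t := fun h => hmt (by rw [hx]; exact h)
        rw [if_neg hmt, List.reverse_cons, hx,
            PySem.List.index?_append_singleton_self t.reverse x (by simpa using hxt)]
        simp only [Prod.mk.injEq, List.length_cons, List.length_reverse, Option.getD_some]
        exact ⟨by push_cast; ring, trivial⟩
    · have hM : (x :: t).foldl min m = t.foldl min m := by
        simp [List.foldl_cons, min_eq_left (le_of_not_ge hge)]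
      have hMx : t.foldl min m ≠ x := by
        have h1 := foldl_min_le_init t m
        intro h; rw [h] at h1; exact hge h1
      rw [show loopA r m k (x :: t) = loopA r m (k + 1) t from by simp [loopA, hge],
          hM, ih r m (k + 1)]
      by_cases hmt : t.foldl min m ∈ t
      · have hmem : t.foldl min m ∈ x :: t := List.mem_cons_of_mem x hmt
        rw [if_pos hmt, if_pos hmem, List.reverse_cons,
            PySem.List.index?_append_of_mem [x] (by simpa using hmt)]
        simp only [Prod.mk.injEq, List.length_cons]
        exact ⟨by push_cast; ring, trivial⟩
      · have hmem : t.foldl min m ∉ x :: t := by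
          intro h; rcases List.mem_cons.mp h with h | h
          · exact hMx h
          · exact hmt h
        rw [if_neg hmt, if_neg hmem]

-- ===== VERDICT (by name: the statement is the Claim_ definition above) =====
theorem clustnum_spec : Claim_equal_clustnum := by
  intro rep pixel _ hpre
  unfold Spec_clustnum
  match rep with
  | [] => exact absurd rfl hpre
  | x :: xs =>
    have hA := bridgeA pixel xs [x] ((0 : Int), calcDistance x pixel)
    simp only [List.singleton_append, List.length_cons, List.length_nil,
      Nat.zero_add] at hA
    rw [loopA_spec] at hA
    rw [Nat.add_comm 1 xs.length] at hA
    simp only [Nat.cast_one] at hA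
    have h0 : (PySem.List.pyGet? (x :: xs) 0).getD [] = x := by
      simp [PySem.List.pyGet?, PySem.List.pyIdx?]
    unfold clustnum
    simp only [List.length_cons, h0]
    rw [hA]
    unfold clustnum_alt
    simp only [List.map_cons, PySem.List.min?_id_cons, Option.getD_some,
      List.length_cons, List.length_map, List.reverse_cons, calcDistance]
    split_ifs with hmt
    · rw [PySem.List.index?_append_of_mem _ (by simpa using hmt)]
      push_cast; ring
    · have hmem := foldl_min_mem (xs.map (fun r => ((r.zip pixel).map (fun p => |p.1 - p.2|)).sum))
        (((x.zip pixel).map (fun p => |p.1 - p.2|)).sum)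
      have hx : List.foldl min (((x.zip pixel).map (fun p => |p.1 - p.2|)).sum)
          (xs.map (fun r => ((r.zip pixel).map (fun p => |p.1 - p.2|)).sum))
          = ((x.zip pixel).map (fun p => |p.1 - p.2|)).sum := by
        rcases List.mem_cons.mp hmem with h | h
        · exact h
        · exact absurd h hmt
      rw [hx] at hmt
      rw [hx, PySem.List.index?_append_singleton_self _ _ (by simpa using hmt)]
      simp only [Option.getD_some, List.length_reverse, List.length_map]
      push_cast; ring
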